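-- pv_equiv track=rewrite | github.com/VladKochetov007/FPGAEnv | src/rlvr_envs/envs/fpga/tasks.py | _round_robin_grant
-- ===== SOURCE A (Python) =====
-- def _round_robin_grant(packed: int) -> int:
--     """Round-robin arbiter grant: given `req[7:0]` and previous `last[2:0]`,
--     output the index of the lowest-set request strictly greater than `last`,
--     wrapping modulo 8. Returns 8 if no request. Packing:
--         data_in[10:8] = last, data_in[7:0] = req
--         data_out[3:0] = grant index (0..7) or 8 (no grant)."""
--     last = (packed >> 8) & 0x7
--     req = packed & 0xFF
--     if req == 0:
--         return 8
--     for k in range(1, 9):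
--         idx = (last + k) % 8
--         if (req >> idx) & 1:
--             return idx
--     return 8  # unreachable
-- ===== SOURCE B (Python) =====
-- def _round_robin_grant(packed: int) -> int:
--     req = packed & 0xFF
--     if req == 0:
--         return 8
--     s = (((packed >> 8) & 0x7) + 1) % 8
--     rot = ((req >> s) | (req << (8 - s))) & 0xFF
--     p = (rot & -rot).bit_length() - 1
--     return (s + p) % 8
-- ===== Notes on version B (the rewrite author's own statement) =====
-- stated objective: alternative
-- what changed: Replaced the linear probe loop over the eight offsets with a closed-form computation: rotate the request byte right by one past the last grant, isolate the lowest set bit via rot & -rot and bit_length, and add the rotation amount back.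
import Mathlib
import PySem

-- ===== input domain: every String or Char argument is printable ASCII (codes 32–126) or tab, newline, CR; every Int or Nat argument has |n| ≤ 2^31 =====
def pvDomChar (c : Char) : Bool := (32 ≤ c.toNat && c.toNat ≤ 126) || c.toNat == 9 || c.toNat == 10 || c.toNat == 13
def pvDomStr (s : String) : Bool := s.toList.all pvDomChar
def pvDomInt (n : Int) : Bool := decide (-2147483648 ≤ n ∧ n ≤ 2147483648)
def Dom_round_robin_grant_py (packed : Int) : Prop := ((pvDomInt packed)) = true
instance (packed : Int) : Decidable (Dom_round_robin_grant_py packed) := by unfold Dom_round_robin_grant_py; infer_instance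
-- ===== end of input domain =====

-- B replaces A's 8-step probe loop by a closed-form rotate / lowest-set-bit computation (alternative, same cost class).

-- ===== PORT A =====
-- the 'for k in range(1, 9): … return idx' loop: first hit returns, fall-through returns 8
def rrLoopA (last req : Int) : List Int → Int
  | [] => 8
  | k :: ks =>
      let idx := PySem.Int.mod (last + k) 8
      if PySem.Int.band (req >>> idx.toNat) 1 ≠ 0 then idx else rrLoopA last req ks

def round_robin_grant_py (packed : Int) : Int :=
  let last := PySem.Int.band (packed >>> (8 : Nat)) 7
  let req := PySem.Int.band packed 255
  if req = 0 then 8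
  else rrLoopA last req (PySem.List.pyRange 1 9 1)

-- ===== PORT B =====
-- shift amounts s and 8-s are ≥ 0 here (s = mod _ 8 ∈ [0,8)), so .toNat is exact for Python's '>>'/'<<'
def round_robin_grant_py_alt (packed : Int) : Int :=
  let req := PySem.Int.band packed 255
  if req = 0 then 8
  else
    let s := PySem.Int.mod (PySem.Int.band (packed >>> (8 : Nat)) 7 + 1) 8
    let rot := PySem.Int.band (PySem.Int.bor (req >>> s.toNat) (req <<< (8 - s).toNat)) 255
    let p : Int := (PySem.Int.bitLength (PySem.Int.band rot (-rot)) : Int) - 1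
    PySem.Int.mod (s + p) 8

-- ===== PRECONDITION & SPEC =====
def Spec_round_robin_grant_py (packed : Int) (out : Int) : Prop := out = round_robin_grant_py_alt packed
instance (packed : Int) (out : Int) : Decidable (Spec_round_robin_grant_py packed out) := by unfold Spec_round_robin_grant_py; infer_instance

-- ===== CLAIM (what is proved, stated in full; the proofs are below) =====
def Claim_equal_round_robin_grant_py : Prop := ∀ (packed : Int), Dom_round_robin_grant_py packed → Spec_round_robin_grant_py packed (round_robin_grant_py packed)

-- ===== LEMMAS AND PROOFS =====

-- A's computation after extracting (last, req)
def coreA (last req : Int) : Int :=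
  if req = 0 then 8 else rrLoopA last req (PySem.List.pyRange 1 9 1)

-- B's computation after extracting (last, req)
def coreB (last req : Int) : Int :=
  if req = 0 then 8
  else
    let s := PySem.Int.mod (last + 1) 8
    let rot := PySem.Int.band (PySem.Int.bor (req >>> s.toNat) (req <<< (8 - s).toNat)) 255
    let p : Int := (PySem.Int.bitLength (PySem.Int.band rot (-rot)) : Int) - 1
    PySem.Int.mod (s + p) 8

theorem portA_eq_core (packed : Int) :
    round_robin_grant_py packed =
      coreA (PySem.Int.band (packed >>> (8 : Nat)) 7) (PySem.Int.band packed 255) := rfl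

theorem portB_eq_core (packed : Int) :
    round_robin_grant_py_alt packed =
      coreB (PySem.Int.band (packed >>> (8 : Nat)) 7) (PySem.Int.band packed 255) := rfl

theorem band_small_bounds (x b : Int) (hb : 0 ≤ b) :
    0 ≤ PySem.Int.band x b ∧ PySem.Int.band x b ≤ b := by
  unfold PySem.Int.band
  split_ifs <;>
    first
      | omega
      | (have h := Nat.and_le_right (n := x.toNat) (m := b.toNat); omega)

set_option maxRecDepth 8192 in
theorem core_eq : ∀ (l : Fin 8) (r : Fin 256), coreA (l : Int) (r : Int) = coreB (l : Int) (r : Int) := by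
  decide

-- ===== VERDICT (by name: the statement is the Claim_ definition above) =====
theorem round_robin_grant_py_spec : Claim_equal_round_robin_grant_py := by
  intro packed _
  unfold Spec_round_robin_grant_py
  rw [portA_eq_core, portB_eq_core]
  obtain ⟨hl0, hl1⟩ := band_small_bounds (packed >>> (8 : Nat)) 7 (by omega)
  obtain ⟨hr0, hr1⟩ := band_small_bounds packed 255 (by omega)
  have hl := core_eq ⟨(PySem.Int.band (packed >>> (8 : Nat)) 7).toNat, by omega⟩
    ⟨(PySem.Int.band packed 255).toNat, by omega⟩
  simpa [Int.toNat_of_nonneg hl0, Int.toNat_of_nonneg hr0] using hl
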